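-- pv_equiv track=rewrite | github.com/syncerpn/leetcode | 2256_min_average_abs_diff.py | solve
-- ===== SOURCE A (Python) =====
-- def solve(nums: list) -> int:
--     acc = 0
--     for n in nums:
--         acc += n
--
--     l = len(nums)
--     right = 0
--     d = acc // l
--     k = l - 1
--
--     i = l - 2
--     while i >= 0:
--         n = nums[i+1]
--         right += n
--         acc -= n
--         di = abs(right // (l-1-i) - acc // (i+1))
--         if d >= di:
--             d = di
--             k = i
--         i -= 1
--
--     return k
-- ===== SOURCE B (Python) =====
-- def solve(nums: list) -> int:
--     l = len(nums)
--     pre = []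
--     s = 0
--     for n in nums:
--         s += n
--         pre.append(s)
--     vals = [abs(pre[i] // (i + 1) - (s - pre[i]) // (l - 1 - i)) for i in range(l - 1)]
--     vals.append(s // l)
--     return vals.index(min(vals))
-- ===== Notes on version B (the rewrite author's own statement) =====
-- stated objective: alternative
-- what changed: Replaces A's single backward while-loop that interleaves two mutating running sums with an online 'd >= di' minimum update by three staged passes: build a prefix-sum array, materialize the whole list of candidate |right_avg - left_avg| values, and return vals.index(min(vals)) for the first argmin.
import Mathlib
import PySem

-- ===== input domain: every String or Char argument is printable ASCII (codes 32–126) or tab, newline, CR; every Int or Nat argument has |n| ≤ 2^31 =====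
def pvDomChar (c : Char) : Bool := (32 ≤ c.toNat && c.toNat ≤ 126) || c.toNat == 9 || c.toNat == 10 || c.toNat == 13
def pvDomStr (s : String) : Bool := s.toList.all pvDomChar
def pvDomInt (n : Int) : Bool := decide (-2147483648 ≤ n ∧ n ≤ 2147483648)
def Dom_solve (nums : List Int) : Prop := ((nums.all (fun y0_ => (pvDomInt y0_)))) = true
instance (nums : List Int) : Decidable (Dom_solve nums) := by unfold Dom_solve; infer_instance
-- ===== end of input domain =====

-- B replaces A's single backward loop (two mutating running sums + online minimum update)
-- by three staged passes: a prefix-sum array, a materialized list of all candidate values,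
-- and vals.index(min(vals)); same O(n) cost, a different decomposition.

-- ===== PORT A =====
-- A's while loop, i descending from l-2 to 0; fuel f processes index i = f-1.
def solveGo (nums : List Int) (l : Int) : Nat → Int → Int → Int → Int → Int
  | 0, _right, _acc, _d, k => k
  | j+1, right, acc, d, k =>
    let i : Int := (j : Int)
    let n := (PySem.List.pyGet? nums (i+1)).getD 0
    let right' := right + n
    let acc' := acc - n
    let di := |PySem.Int.floordiv right' (l-1-i) - PySem.Int.floordiv acc' (i+1)|
    if d ≥ di then solveGo nums l j right' acc' di i
    else solveGo nums l j right' acc' d k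

def solve (nums : List Int) : Int :=
  let acc := nums.foldl (· + ·) 0
  let l : Int := (nums.length : Int)
  let d := PySem.Int.floordiv acc l
  let k := l - 1
  solveGo nums l (l - 1).toNat 0 acc d k

-- ===== PORT B =====
-- pass 1: the prefix-sum list (loop state = (pre, s), appending s + n each step)
def solve_alt (nums : List Int) : Int :=
  let l : Int := (nums.length : Int)
  let ps := nums.foldl (fun (st : List Int × Int) n => (st.1 ++ [st.2 + n], st.2 + n)) ([], 0)
  let pre := ps.1
  let s := ps.2
  -- pass 2: materialize every candidate value
  let vals := (PySem.List.pyRange 0 (l - 1) 1).map (fun i =>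
      |PySem.Int.floordiv (PySem.List.pyGetD pre i 0) (i + 1) -
        PySem.Int.floordiv (s - PySem.List.pyGetD pre i 0) (l - 1 - i)|)
  let vals2 := vals ++ [PySem.Int.floordiv s l]
  -- pass 3: vals.index(min(vals)); both total here since vals2 ≠ [] under Pre_
  match PySem.List.min? vals2 (fun y => y) with
  | some m => match PySem.List.index? vals2 m with
              | some j => (j : Int)
              | none => 0
  | none => 0

-- ===== PRECONDITION & SPEC =====
-- Pre_ excludes only the empty list, on which A raises ZeroDivisionError (acc // l with l == 0)
-- and B raises ZeroDivisionError too (s // l).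
def Pre_solve (nums : List Int) : Prop := nums ≠ []
instance (nums : List Int) : Decidable (Pre_solve nums) := by unfold Pre_solve; infer_instance
def pvWitness_solve : List Int := ([1, 2, 3])

def Spec_solve (nums : List Int) (out : Int) : Prop := out = solve_alt nums
instance (nums : List Int) (out : Int) : Decidable (Spec_solve nums out) := by unfold Spec_solve; infer_instance

-- ===== CLAIM (what is proved, stated in full; the proofs are below) =====
def Claim_equal_solve : Prop := ∀ (nums : List Int), Dom_solve nums → Pre_solve nums → Spec_solve nums (solve nums)

-- ===== LEMMAS AND PROOFS =====

-- prefix sums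
def pref (nums : List Int) (m : Nat) : Int := (nums.take m).foldl (· + ·) 0

-- the candidate value at split index m (for 0 ≤ m < len nums), in A's orientation
def V (nums : List Int) (m : Nat) : Int :=
  let l : Int := (nums.length : Int)
  let left := pref nums (m + 1)
  if (m : Int) < l - 1 then
    |PySem.Int.floordiv ((nums.foldl (· + ·) 0) - left) (l - 1 - (m : Int)) -
      PySem.Int.floordiv left ((m : Int) + 1)|
  else PySem.Int.floordiv (nums.foldl (· + ·) 0) l

-- abstract backward minimum loop (A's update shape)
def backGo (v : Nat → Int) : Nat → Int × Int → Int × Int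
  | 0, s => s
  | j+1, s => if s.1 ≥ v j then backGo v j (v j, (j : Int)) else backGo v j s

-- (d, k) is the minimum of v over [a, n) with k the FIRST index achieving it
def GoodSeg (v : Nat → Int) (a n : Nat) (d k : Int) : Prop :=
  ∃ km : Nat, k = (km : Int) ∧ a ≤ km ∧ km < n ∧ v km = d ∧
    (∀ i, a ≤ i → i < n → d ≤ v i) ∧ (∀ i, a ≤ i → i < km → d < v i)

theorem goodSeg_unique {v : Nat → Int} {a n : Nat} {d k d' k' : Int}
    (h1 : GoodSeg v a n d k) (h2 : GoodSeg v a n d' k') : d = d' ∧ k = k' := by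
  obtain ⟨m1, hk1, ha1, hn1, hv1, hmin1, hfst1⟩ := h1
  obtain ⟨m2, hk2, ha2, hn2, hv2, hmin2, hfst2⟩ := h2
  have hd : d = d' := le_antisymm (hv2 ▸ hmin1 m2 ha2 hn2) (hv1 ▸ hmin2 m1 ha1 hn1)
  subst hd
  have hm : m1 = m2 := by
    by_contra hne
    rcases Nat.lt_or_ge m1 m2 with h | h
    · exact absurd (hfst2 m1 ha1 h) (by simp [hv1])
    · exact absurd (hfst1 m2 ha2 (lt_of_le_of_ne h (Ne.symm hne))) (by simp [hv2])
  exact ⟨rfl, by rw [hk1, hk2, hm]⟩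

theorem pref_succ (nums : List Int) (m : Nat) (h : m < nums.length) :
    pref nums (m + 1) = pref nums m + nums[m] := by
  unfold pref
  rw [List.take_add_one, List.getElem?_eq_getElem h]
  rw [List.foldl_append]
  simp

theorem pref_length_le (nums : List Int) (m : Nat) (h : nums.length ≤ m) :
    pref nums m = nums.foldl (· + ·) 0 := by
  unfold pref
  rw [List.take_of_length_le h]

-- backward loop preserves the spec down to 0
theorem backGo_good (v : Nat → Int) (n : Nat) :
    ∀ (j : Nat) (s : Int × Int), GoodSeg v j n s.1 s.2 →
      GoodSeg v 0 n (backGo v j s).1 (backGo v j s).2 := by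
  intro j
  induction j with
  | zero => intro s hs; simpa [backGo] using hs
  | succ j ih =>
    intro s hs
    obtain ⟨km, hk, ha, hn, hv, hmin, hfst⟩ := hs
    by_cases hc : s.1 ≥ v j
    · rw [backGo, if_pos hc]
      apply ih
      refine ⟨j, rfl, le_refl j, by omega, rfl, ?_, ?_⟩
      · intro i hji hin
        rcases Nat.eq_or_lt_of_le hji with h | h
        · subst h; exact le_refl _
        · exact le_trans hc (hmin i h hin)
      · intro i hji hik; omega
    · rw [backGo, if_neg hc]
      apply ih
      refine ⟨km, hk, by omega, hn, hv, ?_, ?_⟩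
      · intro i hji hin
        rcases Nat.eq_or_lt_of_le hji with h | h
        · subst h; omega
        · exact hmin i h hin
      · intro i hji hik
        rcases Nat.eq_or_lt_of_le hji with h | h
        · subst h; omega
        · exact hfst i h hik

-- A's concrete loop equals the abstract backward loop over V
theorem solveGo_eq_backGo (nums : List Int) :
    ∀ (f : Nat) (d k : Int), f + 1 ≤ nums.length →
      solveGo nums (nums.length : Int) f
        (nums.foldl (· + ·) 0 - pref nums (f + 1)) (pref nums (f + 1)) d k
        = (backGo (V nums) f (d, k)).2 := by
  intro f
  induction f with
  | zero => intro d k _; simp [solveGo, backGo]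
  | succ j ih =>
    intro d k hf
    have hjlt : j + 1 < nums.length := hf
    rw [solveGo]
    have hget : (PySem.List.pyGet? nums ((j : Int) + 1)).getD 0 = nums[j + 1] := by
      have : ((j : Int) + 1) = ((j + 1 : Nat) : Int) := by push_cast; ring
      rw [this, PySem.List.pyGet?_natCast]
      simp [hjlt]
    have hpre : nums.foldl (· + ·) 0 - pref nums (j + 1 + 1) + nums[j + 1] =
        nums.foldl (· + ·) 0 - pref nums (j + 1) := by
      rw [pref_succ nums (j + 1) hjlt]; ring
    have hacc : pref nums (j + 1 + 1) - nums[j + 1] = pref nums (j + 1) := by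
      rw [pref_succ nums (j + 1) hjlt]; ring
    have hV : |PySem.Int.floordiv (nums.foldl (· + ·) 0 - pref nums (j + 1))
          ((nums.length : Int) - 1 - (j : Int)) -
        PySem.Int.floordiv (pref nums (j + 1)) ((j : Int) + 1)| = V nums j := by
      unfold V
      rw [if_pos (by omega)]
    rw [backGo]
    simp only [hget, hpre, hacc, hV]
    split_ifs with hc
    · exact ih (V nums j) (j : Int) (by omega)
    · exact ih d k (by omega)

theorem solve_eq_argmin (nums : List Int) (h : nums ≠ []) :
    GoodSeg (V nums) 0 nums.length
      ((backGo (V nums) (nums.length - 1)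
        (PySem.Int.floordiv (nums.foldl (· + ·) 0) (nums.length : Int),
         (nums.length : Int) - 1)).1)
      ((backGo (V nums) (nums.length - 1)
        (PySem.Int.floordiv (nums.foldl (· + ·) 0) (nums.length : Int),
         (nums.length : Int) - 1)).2) := by
  have hlen : 1 ≤ nums.length := List.length_pos_iff.mpr h
  apply backGo_good
  refine ⟨nums.length - 1, by omega, le_refl _, by omega, ?_, ?_, ?_⟩
  · unfold V
    rw [if_neg (by omega)]
  · intro i h1 h2
    have : i = nums.length - 1 := by omega
    subst this
    unfold V
    rw [if_neg (by omega)]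
  · intro i h1 h2; omega


theorem foldl_shift (xs : List Int) (a : Int) :
    xs.foldl (· + ·) a = a + xs.foldl (· + ·) 0 := by
  have h1 := PySem.List.foldl_add xs id a
  have h2 := PySem.List.foldl_add xs id 0
  simp only [id] at h1 h2
  rw [h1, h2, zero_add]

-- B's pass 1 builds exactly the prefix-sum list
theorem buildPre_spec :
    ∀ (nums : List Int) (pr : List Int) (s : Int),
      nums.foldl (fun (st : List Int × Int) n => (st.1 ++ [st.2 + n], st.2 + n)) (pr, s)
        = (pr ++ (List.range nums.length).map (fun k => s + pref nums (k + 1)),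
           s + nums.foldl (· + ·) 0) := by
  intro nums
  induction nums with
  | nil => intro pr s; simp [pref]
  | cons n rest ih =>
    intro pr s
    rw [List.foldl_cons, ih]
    have hpref : ∀ k : Nat, pref (n :: rest) (k + 1 + 1) = n + pref rest (k + 1) := by
      intro k
      unfold pref
      simp [List.take_succ_cons]
      exact foldl_shift _ n
    have hone : pref (n :: rest) 1 = n := by simp [pref]
    simp only [Prod.mk.injEq]
    refine ⟨?_, ?_⟩
    · rw [List.append_assoc]
      congr 1
      rw [List.length_cons, List.range_succ_eq_map, List.map_cons, List.map_map,
        List.singleton_append]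
      congr 1
      · norm_num [hone]
      · apply List.map_congr_left
        intro k _
        simp only [Function.comp_apply]
        rw [show Nat.succ k + 1 = k + 1 + 1 from rfl, hpref k]
        ring
    · rw [List.foldl_cons, zero_add, foldl_shift rest n]
      ring

-- B's materialized candidate list is the map of V over range
theorem vals2_eq (nums : List Int) (h : nums ≠ []) :
    ((PySem.List.pyRange 0 ((nums.length : Int) - 1) 1).map (fun i =>
        |PySem.Int.floordiv
            (PySem.List.pyGetD ((List.range nums.length).map (fun k => pref nums (k + 1))) i 0)
            (i + 1) -
          PySem.Int.floordiv
            (nums.foldl (· + ·) 0 -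
              PySem.List.pyGetD ((List.range nums.length).map (fun k => pref nums (k + 1))) i 0)
            ((nums.length : Int) - 1 - i)|)
      ++ [PySem.Int.floordiv (nums.foldl (· + ·) 0) (nums.length : Int)])
    = (List.range nums.length).map (V nums) := by
  have hlen : 1 ≤ nums.length := List.length_pos_iff.mpr h
  have hrange : (List.range nums.length) = List.range (nums.length - 1) ++ [nums.length - 1] := by
    conv_lhs => rw [show nums.length = (nums.length - 1) + 1 by omega]
    rw [List.range_succ]
  conv_rhs => rw [hrange]
  rw [List.map_append]
  congr 1
  · rw [PySem.List.pyRange_one]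
    have hcast : ((nums.length : Int) - 1 - 0).toNat = nums.length - 1 := by omega
    rw [hcast, List.map_map]
    apply List.map_congr_left
    intro k hk
    rw [List.mem_range] at hk
    have hget : PySem.List.pyGetD ((List.range nums.length).map (fun k => pref nums (k + 1)))
        ((0 : Int) + (k : Int)) 0 = pref nums (k + 1) := by
      rw [zero_add, PySem.List.pyGetD_natCast]
      rw [List.getD_eq_getElem?_getD, List.getElem?_map,
        List.getElem?_range (by omega : k < nums.length)]
      rfl
    simp only [Function.comp, hget]
    unfold V
    rw [if_pos (by omega)]
    rw [abs_sub_comm]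
    norm_num
  · simp only [List.map_cons, List.map_nil]
    unfold V
    rw [if_neg (by omega)]

-- B returns the first argmin of V
theorem solve_alt_good (nums : List Int) (h : nums ≠ []) :
    GoodSeg (V nums) 0 nums.length (V nums ((solve_alt nums).toNat)) (solve_alt nums) := by
  have hlen : 1 ≤ nums.length := List.length_pos_iff.mpr h
  have hps := buildPre_spec nums [] 0
  simp only [List.nil_append, zero_add] at hps
  have hvals2 := vals2_eq nums h
  unfold solve_alt
  simp only [hps]
  rw [hvals2]
  set vals2 := (List.range nums.length).map (V nums) with hv2
  have hne : vals2 ≠ [] := by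
    simp [hv2]
    omega
  cases hm : PySem.List.min? vals2 (fun y => y) with
  | none => exact absurd ((PySem.List.min?_eq_none_iff vals2 _).mp hm) hne
  | some m =>
  have hmem : m ∈ vals2 := PySem.List.min?_mem hm
  cases hj : PySem.List.index? vals2 m with
  | none => exact absurd hmem ((PySem.List.index?_eq_none_iff vals2 m).mp hj)
  | some j =>
  dsimp only
  rw [hj]
  dsimp only
  obtain ⟨hjlt, hjv, hjfst⟩ := PySem.List.getElem_of_index?_eq_some hj
  have hmin := PySem.List.min?_isMin hm
  have hlen2 : vals2.length = nums.length := by simp [hv2]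
  have hVj : ∀ i (hi : i < vals2.length), vals2[i] = V nums i := by
    intro i hi
    simp only [hv2]
    rw [List.getElem_map, List.getElem_range]
  have hVmem : ∀ i, i < nums.length → V nums i ∈ vals2 := by
    intro i hi
    rw [hv2]
    exact List.mem_map.mpr ⟨i, List.mem_range.mpr hi, rfl⟩
  refine ⟨j, by simp, Nat.zero_le j, by omega, ?_, ?_, ?_⟩
  · rw [Int.toNat_natCast, ← hVj j hjlt, hjv]
  · intro i _ hi
    rw [Int.toNat_natCast, ← hVj j hjlt, hjv]
    exact hmin _ (hVmem i hi)
  · intro i _ hij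
    rw [Int.toNat_natCast, ← hVj j hjlt, hjv]
    have hne' : vals2[i] ≠ m := hjfst i hij
    have hle : m ≤ vals2[i] := hmin _ (List.getElem_mem _)
    rw [hVj i (by omega)] at hne' hle
    omega

-- ===== VERDICT (by name: the statement is the Claim_ definition above) =====
theorem solve_spec : Claim_equal_solve := by
  intro nums _ hpre
  have h : nums ≠ [] := hpre
  have hlen : 1 ≤ nums.length := List.length_pos_iff.mpr h
  show solve nums = solve_alt nums
  -- A side
  have hA : solve nums
      = (backGo (V nums) (nums.length - 1)
          (PySem.Int.floordiv (nums.foldl (· + ·) 0) (nums.length : Int),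
           (nums.length : Int) - 1)).2 := by
    have htn : ((nums.length : Int) - 1).toNat = nums.length - 1 := by omega
    have hsub : (nums.length - 1) + 1 = nums.length := by omega
    have hpl : pref nums ((nums.length - 1) + 1) = nums.foldl (· + ·) 0 := by
      rw [hsub]; exact pref_length_le nums nums.length (le_refl _)
    have := solveGo_eq_backGo nums (nums.length - 1)
      (PySem.Int.floordiv (nums.foldl (· + ·) 0) (nums.length : Int))
      ((nums.length : Int) - 1) (by omega)
    rw [hpl, sub_self] at this
    simp only [solve, htn]
    exact this
  have hAgood := solve_eq_argmin nums h
  rw [← hA] at hAgood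
  have hBgood := solve_alt_good nums h
  exact (goodSeg_unique hAgood hBgood).2
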